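-- pv_equiv track=rewrite | github.com/monkey0211/AlgoInPython | test.py | second_greatest_number
-- ===== SOURCE A (Python) =====
-- def second_greatest_number(digits):
--     # Sort digits in descending order to get the greatest number
--     digits.sort(reverse=True)
--
--     # Find the first position from the right where the digit is smaller than the previous digit
--     for i in range(len(digits) - 1, 0, -1):
--         if digits[i] < digits[i - 1]:
--             # Find the largest digit to the right of digits[i-1] that is smaller than digits[i-1]
--             max_digit_index = i
--             for j in range(i, len(digits)):
--                 if digits[j] < digits[i - 1] and digits[j] > digits[max_digit_index]:
--                     max_digit_index = j
--             # Swap the digits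
--             digits[i - 1], digits[max_digit_index] = digits[max_digit_index], digits[i - 1]
--             # Sort the digits to the right of i-1 in descending order
--             digits = digits[:i] + sorted(digits[i:], reverse=True)
--             break
--     else:
--         # If no such digit is found, it means all digits are in descending order
--         return None
--
--     # Convert the list of digits back to an integer
--     return int(''.join(map(str, digits)))
-- ===== SOURCE B (Python) =====
-- def second_greatest_number(digits):
--     # Greatest arrangement: digits sorted descending (in place, like A).
--     digits.sort(reverse=True)
--     if not digits or digits[0] == digits[-1]:
--         # fewer than 2 digits, or all digits equal: no strictly smaller arrangement
--         return None
--     # The second-greatest arrangement moves one copy of the minimum digit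
--     # just in front of the last non-minimum digit.
--     m = digits[-1]
--     k = digits.count(m)
--     arranged = digits[:-k - 1] + [m, digits[-k - 1]] + [m] * (k - 1)
--     return int(''.join(map(str, arranged)))
-- ===== Notes on version B (the rewrite author's own statement) =====
-- stated objective: simpler
-- what changed: A scans the descending-sorted list right-to-left for a descent, runs an inner loop to pick a swap partner, swaps and re-sorts the suffix; B constructs the answer directly by counting the minimum digit: it splices one copy of the minimum in front of the last non-minimum digit, with no descent scan, no inner loop and no second sort.
import Mathlib
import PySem

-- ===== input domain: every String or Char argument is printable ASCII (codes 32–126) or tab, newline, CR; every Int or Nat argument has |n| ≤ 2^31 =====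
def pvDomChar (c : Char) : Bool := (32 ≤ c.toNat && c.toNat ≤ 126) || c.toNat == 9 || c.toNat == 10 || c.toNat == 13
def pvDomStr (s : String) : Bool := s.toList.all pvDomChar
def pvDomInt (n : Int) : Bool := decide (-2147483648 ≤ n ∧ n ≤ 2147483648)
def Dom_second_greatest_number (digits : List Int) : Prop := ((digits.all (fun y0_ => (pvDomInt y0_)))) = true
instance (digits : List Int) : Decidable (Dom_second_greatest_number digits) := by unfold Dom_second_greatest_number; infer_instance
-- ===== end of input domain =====

-- B constructs the second-greatest arrangement directly by counting the minimum digit instead of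
-- A's descent-scan/swap/re-sort (objective: simpler); equivalence is about the RETURN value — both
-- Pythons also sort the argument in place (A additionally swaps two of its entries before rebinding).

-- ===== PORT A =====
-- outer 'for i in range(len(digits)-1, 0, -1): … break / else: return None' over the index list;
-- 'some ds' = the loop body ran (break), 'none' = the for-else path (return None)
def sgnOuter (ds : List Int) : List Int → Option (List Int)
  | [] => none
  | i :: rest =>
    if PySem.List.pyGetD ds i 0 < PySem.List.pyGetD ds (i - 1) 0 then
      -- for j in range(i, len(digits)): if digits[j] < digits[i-1] and digits[j] > digits[max_digit_index]: max_digit_index = j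
      let mdi := (PySem.List.pyRange i (ds.length : Int) 1).foldl
        (fun mdi j =>
          if PySem.List.pyGetD ds j 0 < PySem.List.pyGetD ds (i - 1) 0 ∧
             PySem.List.pyGetD ds mdi 0 < PySem.List.pyGetD ds j 0 then j else mdi) i
      -- digits[i-1], digits[max_digit_index] = digits[max_digit_index], digits[i-1]
      let a := PySem.List.pyGetD ds (i - 1) 0
      let b := PySem.List.pyGetD ds mdi 0
      let ds1 := PySem.List.pySetD (PySem.List.pySetD ds (i - 1) b) mdi a
      -- digits = digits[:i] + sorted(digits[i:], reverse=True)
      some (PySem.List.slice ds1 none (some i) ++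
            PySem.List.sorted (PySem.List.slice ds1 (some i) none) (fun x => x) true)
    else sgnOuter ds rest

def second_greatest_number (digits : List Int) : Option Int :=
  let ds := PySem.List.sorted digits (fun x => x) true
  match sgnOuter ds (PySem.List.pyRange ((ds.length : Int) - 1) 0 (-1)) with
  | none => none
  | some final => PySem.Int.ofStr? (PySem.Str.join "" (final.map PySem.Int.toStr))

-- ===== PORT B =====
def second_greatest_number_alt (digits : List Int) : Option Int :=
  let s := PySem.List.sorted digits (fun x => x) true
  if s.isEmpty ∨ PySem.List.pyGetD s 0 0 = PySem.List.pyGetD s (-1) 0 then none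
  else
    let m := PySem.List.pyGetD s (-1) 0
    let k : Nat := PySem.List.count s m
    let arranged := PySem.List.slice s none (some (-(k : Int) - 1)) ++
                    [m, PySem.List.pyGetD s (-(k : Int) - 1) 0] ++
                    PySem.List.pyRepeat [m] ((k : Int) - 1)
    PySem.Int.ofStr? (PySem.Str.join "" (arranged.map PySem.Int.toStr))

-- ===== PRECONDITION & SPEC =====
-- Pre_ excludes exactly the inputs on which A raises ValueError in int(''.join(...)): lists that
-- contain a negative digit, are not all-equal, and are not a length-2 pair with a nonnegative digit
-- (there the minus sign of the rearrangement is leading and still parses); B raises on exactly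
-- the same inputs.
def Pre_second_greatest_number (digits : List Int) : Prop :=
  (∀ d ∈ digits, 0 ≤ d) ∨ (∀ a ∈ digits, ∀ b ∈ digits, a = b) ∨
  (digits.length = 2 ∧ ∃ d ∈ digits, 0 ≤ d)
instance (digits : List Int) : Decidable (Pre_second_greatest_number digits) := by
  unfold Pre_second_greatest_number; infer_instance

def pvWitness_second_greatest_number : List Int := [3, 1, 2, 1]

def Spec_second_greatest_number (digits : List Int) (out : Option Int) : Prop :=
  out = second_greatest_number_alt digits
instance (digits : List Int) (out : Option Int) : Decidable (Spec_second_greatest_number digits out) := by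
  unfold Spec_second_greatest_number; infer_instance

-- ===== CLAIM (what is proved, stated in full; the proofs are below) =====
def Claim_equal_second_greatest_number : Prop :=
  ∀ (digits : List Int), Dom_second_greatest_number digits →
    Pre_second_greatest_number digits →
    Spec_second_greatest_number digits (second_greatest_number digits)

-- ===== LEMMAS AND PROOFS =====

-- the part of each port after 'digits.sort(reverse=True)', as functions of the sorted list
def aRest (s : List Int) : Option Int :=
  match sgnOuter s (PySem.List.pyRange ((s.length : Int) - 1) 0 (-1)) with
  | none => none
  | some final => PySem.Int.ofStr? (PySem.Str.join "" (final.map PySem.Int.toStr))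

def bRest (s : List Int) : Option Int :=
  if s.isEmpty ∨ PySem.List.pyGetD s 0 0 = PySem.List.pyGetD s (-1) 0 then none
  else
    let m := PySem.List.pyGetD s (-1) 0
    let k : Nat := PySem.List.count s m
    let arranged := PySem.List.slice s none (some (-(k : Int) - 1)) ++
                    [m, PySem.List.pyGetD s (-(k : Int) - 1) 0] ++
                    PySem.List.pyRepeat [m] ((k : Int) - 1)
    PySem.Int.ofStr? (PySem.Str.join "" (arranged.map PySem.Int.toStr))

theorem aRest_def (digits : List Int) :
    second_greatest_number digits = aRest (PySem.List.sorted digits (fun x => x) true) := rfl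

theorem bRest_def (digits : List Int) :
    second_greatest_number_alt digits = bRest (PySem.List.sorted digits (fun x => x) true) := rfl

-- shape of a descending-sorted list: empty, constant, or a block u ++ [x] followed by the minima
theorem sgn_decomp (s : List Int) (hpw : s.Pairwise (fun a b => b ≤ a)) :
    s = [] ∨ (∃ c r, s = c :: List.replicate r c) ∨
    (∃ u x m r, s = u ++ x :: m :: List.replicate r m ∧ m < x ∧ ∀ y ∈ u, x ≤ y) := by
  induction s with
  | nil => exact Or.inl rfl
  | cons a t ih =>
    have hpt : t.Pairwise (fun a b => b ≤ a) := (List.pairwise_cons.mp hpw).2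
    have hha : ∀ y ∈ t, y ≤ a := (List.pairwise_cons.mp hpw).1
    rcases ih hpt with h | ⟨c, r, hc⟩ | ⟨u, x, m, r, hs, hmx, hu⟩
    · subst h; exact Or.inr (Or.inl ⟨a, 0, rfl⟩)
    · by_cases hac : a = c
      · subst hac hc; exact Or.inr (Or.inl ⟨a, r + 1, rfl⟩)
      · have hca : c ≤ a := hha c (by simp [hc])
        have hlt : c < a := lt_of_le_of_ne hca (fun h => hac h.symm)
        refine Or.inr (Or.inr ⟨[], a, c, r, ?_, hlt, by simp⟩)
        simp [hc]
    · refine Or.inr (Or.inr ⟨a :: u, x, m, r, by simp [hs], hmx, ?_⟩)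
      intro y hy
      rcases List.mem_cons.mp hy with h | h
      · subst h; exact hha x (by simp [hs])
      · exact hu y h

theorem set_append_length (u : List Int) (x v : Int) (rest : List Int) :
    (u ++ x :: rest).set u.length v = u ++ v :: rest := by
  induction u with
  | nil => rfl
  | cons a t ih => simp [ih]

theorem getD_append_length (u : List Int) (x : Int) (rest : List Int) (d : Int) :
    (u ++ x :: rest).getD u.length d = x := by
  induction u with
  | nil => rfl
  | cons a t ih => simp [ih]

theorem getElem_append_len (u : List Int) (x : Int) (rest : List Int)
    (h : u.length < (u ++ x :: rest).length) :
    (u ++ x :: rest)[u.length] = x := by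
  rw [List.getElem_append_right (le_refl _)]
  simp

-- the for-else path: no index in the list satisfies the descent test
theorem sgnOuter_none (ds : List Int) (idxs : List Int)
    (h : ∀ i ∈ idxs, ¬ PySem.List.pyGetD ds i 0 < PySem.List.pyGetD ds (i - 1) 0) :
    sgnOuter ds idxs = none := by
  induction idxs with
  | nil => rfl
  | cons i rest ih =>
    rw [sgnOuter, if_neg (h i (by simp))]
    exact ih (fun j hj => h j (by simp [hj]))

-- skipping a prefix of indices on which the descent test fails
theorem sgnOuter_append (ds : List Int) (l1 l2 : List Int)
    (h : ∀ i ∈ l1, ¬ PySem.List.pyGetD ds i 0 < PySem.List.pyGetD ds (i - 1) 0) :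
    sgnOuter ds (l1 ++ l2) = sgnOuter ds l2 := by
  induction l1 with
  | nil => rfl
  | cons i rest ih =>
    rw [List.cons_append, sgnOuter, if_neg (h i (by simp))]
    exact ih (fun j hj => h j (by simp [hj]))

-- the inner max_digit_index loop never moves off an index holding the minimum
theorem innerFold_const (s : List Int) (X : Int) (m : Int) (js : List Int) (acc : Int)
    (hjs : ∀ j ∈ js, PySem.List.pyGetD s j 0 = m)
    (hacc : PySem.List.pyGetD s acc 0 = m) :
    js.foldl (fun mdi j =>
      if PySem.List.pyGetD s j 0 < X ∧
         PySem.List.pyGetD s mdi 0 < PySem.List.pyGetD s j 0 then j else mdi) acc = acc := by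
  induction js with
  | nil => rfl
  | cons j rest ih =>
    have hj : PySem.List.pyGetD s j 0 = m := hjs j (by simp)
    rw [List.foldl_cons, if_neg (by rw [hj, hacc]; omega)]
    exact ih (fun j' hj' => hjs j' (by simp [hj']))

-- elements of the trailing minima block
theorem pyGetD_tail_block (u : List Int) (x m : Int) (r : Nat) (j : Int)
    (hj1 : (u.length : Int) + 1 ≤ j) (hj2 : j < (u.length : Int) + 2 + r) :
    PySem.List.pyGetD (u ++ x :: m :: List.replicate r m) j 0 = m := by
  have hlen : (u ++ x :: m :: List.replicate r m).length = u.length + 2 + r := by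
    simp; omega
  rw [PySem.List.pyGetD_eq_getElem _ 0 (by omega) (by rw [hlen]; push_cast; omega)]
  rw [List.getElem_append_right (by omega)]
  rw [List.getElem_cons]
  split
  · omega
  · rw [List.getElem_cons]
    split
    · rfl
    · exact List.getElem_replicate ..

-- all-equal list: every in-range element is c
theorem pyGetD_const (c : Int) (r : Nat) (j : Int)
    (h0 : 0 ≤ j) (h1 : j < (r : Int) + 1) :
    PySem.List.pyGetD (c :: List.replicate r c) j 0 = c := by
  rw [PySem.List.pyGetD_eq_getElem _ 0 h0 (by simp; omega)]
  rw [List.getElem_cons]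
  split
  · rfl
  · exact List.getElem_replicate ..

theorem getLast_cons_replicate (m : Int) (r : Nat) (h : (m :: List.replicate r m) ≠ []) :
    (m :: List.replicate r m).getLast h = m := by
  rw [List.getLast_eq_getElem, List.getElem_cons]
  split
  · rfl
  · exact List.getElem_replicate ..

-- the core equality, for any descending-sorted list
theorem rest_eq (s : List Int) (hpw : s.Pairwise (fun a b => b ≤ a)) :
    aRest s = bRest s := by
  rcases sgn_decomp s hpw with hnil | ⟨c, r, hs⟩ | ⟨u, x, m, r, hs, hmx, hu⟩
  · subst hnil; decide
  · -- constant list: both return none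
    subst hs
    have hlast : PySem.List.pyGetD (c :: List.replicate r c) (-1) 0 = c := by
      rw [PySem.List.pyGetD_neg_one _ _ (by simp)]
      exact getLast_cons_replicate c r _
    have ha : aRest (c :: List.replicate r c) = none := by
      unfold aRest
      rw [sgnOuter_none]
      intro i hi
      rw [PySem.List.mem_pyRange_neg_one] at hi
      have hlen : ((c :: List.replicate r c).length : Int) = (r : Int) + 1 := by
        push_cast [List.length_cons, List.length_replicate]
        ring
      rw [hlen] at hi
      rw [pyGetD_const c r i (by omega) (by omega),
          pyGetD_const c r (i - 1) (by omega) (by omega)]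
      omega
    have hb : bRest (c :: List.replicate r c) = none := by
      unfold bRest
      rw [if_pos]
      right
      rw [hlast, PySem.List.pyGetD_zero_cons]
    rw [ha, hb]
  · -- descent: both build u ++ [m, x] ++ replicate r m
    have hq : s.length = u.length + 2 + r := by
      subst hs; simp; omega
    have hmem : ∀ j : Int, (u.length : Int) + 1 ≤ j → j < (u.length : Int) + 2 + r →
        PySem.List.pyGetD s j 0 = m := by
      intro j h1 h2; rw [hs]; exact pyGetD_tail_block u x m r j h1 h2
    have hx : PySem.List.pyGetD s (u.length : Int) 0 = x := by
      rw [hs, PySem.List.pyGetD_natCast]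
      exact getD_append_length u x _ 0
    have hm1 : PySem.List.pyGetD s ((u.length : Int) + 1) 0 = m :=
      hmem _ (le_refl _) (by omega)
    have hlast : PySem.List.pyGetD s (-1) 0 = m := by
      rw [hs, PySem.List.pyGetD_neg_one _ _ (by simp)]
      rw [List.getLast_append_of_ne_nil _ (List.cons_ne_nil _ _), List.getLast_cons (List.cons_ne_nil _ _)]
      exact getLast_cons_replicate m r _
    have hhead : m < PySem.List.pyGetD s 0 0 := by
      cases u with
      | nil => rw [hs, List.nil_append, PySem.List.pyGetD_zero_cons]; exact hmx
      | cons a u' =>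
        rw [hs, List.cons_append, PySem.List.pyGetD_zero_cons]
        have := hu a (by simp)
        omega
    have hcount : PySem.List.count s m = r + 1 := by
      rw [PySem.List.count_eq, hs]
      have hu0 : List.count m u = 0 := by
        rw [List.count_eq_zero]
        intro hmu
        have := hu m hmu
        omega
      have hxm : ¬ x = m := by omega
      simp [List.count_append, hu0, hxm]
    have hq2 : (u ++ x :: m :: List.replicate r m).length = u.length + 2 + r := by
      simp only [List.length_append, List.length_cons, List.length_replicate]
      omega
    -- B side
    have hb : bRest s = PySem.Int.ofStr?
        (PySem.Str.join "" ((u ++ m :: x :: List.replicate r m).map PySem.Int.toStr)) := by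
      unfold bRest
      rw [if_neg (by
        rw [hlast]
        rintro (h1 | h2)
        · rw [hs] at h1; simp at h1
        · omega)]
      dsimp only
      rw [hlast, hcount]
      have hidx : (-((r + 1 : Nat) : Int) - 1) = -(((r + 2 : Nat) : Int)) := by push_cast; ring
      rw [hidx, PySem.List.slice_to_neg_natCast _ _ (by omega)]
      have htake : List.take (s.length - (r + 2)) s = u := by
        rw [hs, hq2]
        exact List.take_left' (by omega)
      have hget : PySem.List.pyGetD s (-((r + 2 : Nat) : Int)) 0 = x := by
        rw [PySem.List.pyGetD_neg_natCast _ _ _ (by omega) (by omega)]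
        simp only [hs, hq2]
        have hidx2 : u.length + 2 + r - (r + 2) = u.length := by omega
        simp only [hidx2]
        exact getElem_append_len u x _ (by simp)
      rw [htake, hget, PySem.List.pyRepeat_singleton]
      have : (((r + 1 : Nat) : Int) - 1).toNat = r := by omega
      rw [this]
      simp [List.append_assoc]
    -- A side
    have hrange : PySem.List.pyRange ((s.length : Int) - 1) 0 (-1) =
        PySem.List.pyRange ((u.length : Int) + 1 + r) ((u.length : Int) + 1) (-1) ++
        PySem.List.pyRange ((u.length : Int) + 1) 0 (-1) := by
      rw [PySem.List.pyRange_neg_one_eq_reverse, PySem.List.pyRange_neg_one_eq_reverse,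
          PySem.List.pyRange_neg_one_eq_reverse]
      rw [← List.reverse_append]
      congr 1
      rw [show ((0 : Int) + 1) = 1 from rfl]
      have hlen' : (s.length : Int) - 1 + 1 = (u.length : Int) + 2 + r := by
        rw [hq]; push_cast; ring
      rw [hlen']
      have := PySem.List.pyRange_one_append 1 ((u.length : Int) + 1 + 1) ((u.length : Int) + 2 + r)
        (by omega) (by omega)
      rw [show ((u.length : Int) + 1 + 1) = (u.length : Int) + 2 from by ring] at this ⊢
      rw [show ((u.length : Int) + 1 + r + 1) = (u.length : Int) + 2 + r from by ring]
      exact this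
    have ha : aRest s = PySem.Int.ofStr?
        (PySem.Str.join "" (((u ++ [m]) ++ x :: List.replicate r m).map PySem.Int.toStr)) := by
      unfold aRest
      rw [hrange, sgnOuter_append _ _ _ (by
        intro i hi
        rw [PySem.List.mem_pyRange_neg_one] at hi
        rw [hmem i (by omega) (by omega), hmem (i - 1) (by omega) (by omega)]
        omega)]
      rw [PySem.List.pyRange_neg_one_cons (by positivity), sgnOuter]
      rw [show (u.length : Int) + 1 - 1 = (u.length : Int) from by ring]
      rw [if_pos (by rw [hm1, hx]; exact hmx)]
      dsimp only
      rw [innerFold_const s _ m _ _ (by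
        intro j hj
        rw [PySem.List.mem_pyRange_one] at hj
        exact hmem j hj.1 (by rw [hq] at hj; push_cast at hj; omega)) hm1]
      rw [hm1, hx]
      rw [PySem.List.pySetD_of_nonneg _ _ (by positivity),
          PySem.List.pySetD_of_nonneg _ _ (by positivity)]
      rw [show ((u.length : Int)).toNat = u.length from by omega,
          show ((u.length : Int) + 1).toNat = u.length + 1 from by omega]
      rw [hs, set_append_length]
      have hstep : (u ++ m :: m :: List.replicate r m).set (u.length + 1) x =
          (u ++ [m]) ++ x :: List.replicate r m := by
        have : u ++ m :: m :: List.replicate r m = (u ++ [m]) ++ m :: List.replicate r m := by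
          simp
        rw [this, show u.length + 1 = (u ++ [m]).length from by simp, set_append_length]
      rw [hstep]
      rw [PySem.List.slice_to _ (by positivity), PySem.List.slice_from _ (by positivity)]
      rw [show ((u.length : Int) + 1).toNat = u.length + 1 from by omega]
      rw [show u.length + 1 = (u ++ [m]).length from by simp]
      rw [List.take_left, List.drop_left]
      rw [PySem.List.sorted_rev_eq_self_of_pairwise _ _ (by
        rw [List.pairwise_cons]
        refine ⟨?_, ?_⟩
        · intro y hy
          rw [List.eq_of_mem_replicate hy]
          exact le_of_lt hmx
        · exact List.pairwise_replicate.mpr (Or.inr (le_refl m)) )]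
    rw [ha, hb]
    congr 1
    simp [List.append_assoc]

-- ===== VERDICT (by name: the statement is the Claim_ definition above) =====
theorem second_greatest_number_spec : Claim_equal_second_greatest_number := by
  intro digits _ _
  unfold Spec_second_greatest_number
  rw [aRest_def, bRest_def]
  exact rest_eq _ (PySem.List.sorted_pairwise_rev digits (fun x => x))
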